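-- pv_equiv track=rewrite | github.com/PhishersOfMen/Assn2-Cryptanalysis | findKey.py | Lengther
-- ===== SOURCE A (Python) =====
-- import textwrap
--
-- def findLength(text, cipherText, key):
--     text = text.replace(" ", "")
--     key = key.replace(" ", "")
--     rowList = textwrap.wrap(text, len(key))
--     valueList = []
--     for k in key:
--         valueList.append({"key": k, "vals": []})
--     for i in rowList:
--         for j in range(len(i)):
--             valueList[j]["vals"].append(i[j])
--     for i in valueList:
--         tempStr = str("".join(i["vals"]))
--         i["vals"] = tempStr
--     result = cipherText.find(valueList[0]["vals"])
--     if result == -1: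
--        return False
--     else:
--        return True
--
-- def Lengther(text, cipherText):
--     text = text.replace(" ", "")
--     cipherText = cipherText.replace(" ","")
--     if(len(text) != len(cipherText)):
--         return 0
--     counter = ""
--     done = False
--     while (done == False):
--         counter += "a"
--         if(len(counter) > 7):
--             return 0
--         else:
--
--             done = findLength(text,cipherText,counter)
--     num = len(counter)
--     return num
-- ===== SOURCE B (Python) =====
-- def Lengther(text, cipherText):
--     text = text.replace(" ", "")
--     cipherText = cipherText.replace(" ", "")
--     if len(text) != len(cipherText):
--         return 0
--     for L in range(1, 8):
--         if text[::L] in cipherText: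
--             return L
--     return 0
-- ===== Notes on version B (the rewrite author's own statement) =====
-- stated objective: faster
-- what changed: B replaces A's textwrap.wrap row construction and the per-key-column dict list (of which only column 0 is ever read) by testing the single stride slice text[::L] for each candidate key length L in 1..7 with the in operator.
-- outside the precondition, e.g. on Lengther('a-ab', 'aba-'): A returns 4, B returns 3; on Lengther('a\t', '\ta'): A returns 1, B returns 2
import Mathlib
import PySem

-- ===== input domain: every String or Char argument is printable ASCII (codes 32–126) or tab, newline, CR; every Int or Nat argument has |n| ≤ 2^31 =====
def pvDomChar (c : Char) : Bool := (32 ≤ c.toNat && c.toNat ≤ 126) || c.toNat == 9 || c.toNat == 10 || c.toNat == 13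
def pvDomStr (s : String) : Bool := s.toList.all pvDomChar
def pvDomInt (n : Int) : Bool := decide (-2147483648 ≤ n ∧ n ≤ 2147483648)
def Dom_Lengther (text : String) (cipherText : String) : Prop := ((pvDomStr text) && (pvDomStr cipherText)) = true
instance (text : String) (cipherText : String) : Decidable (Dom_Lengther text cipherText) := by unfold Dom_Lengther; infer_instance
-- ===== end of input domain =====

-- B replaces A's textwrap.wrap rows + list-of-column-dicts (only column 0 is ever read)
-- by testing the stride slice text[0::L] for each key length L in 1..7 (objective: faster,
-- measured: B skips building the rows and all key-length columns).

-- ===== PORT A =====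

-- textwrap.wrap(text, w), ported by hand: exact for hyphen-free input (checked against
-- CPython; Pre_ admits only hyphen- and whitespace-free stripped text anyway): expandtabs(8),
-- whitespace collapsed to ' ', split into runs, greedy line filling with break_long_words.
-- Hyphen word-splitting (break_on_hyphens) is not modelled; Pre_ excludes hyphens.
def pvIsWS (ch : List Char) : Bool := ch.all (· == ' ')

def pvExpandTabs : List Char → Nat → List Char
  | [], _ => []
  | c :: rest, col =>
    if c = '\t' then List.replicate (8 - col % 8) ' ' ++ pvExpandTabs rest 0
    else if c = '\n' ∨ c = '\r' then c :: pvExpandTabs rest 0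
    else c :: pvExpandTabs rest (col + 1)

def pvMunge (cs : List Char) : List Char :=
  (pvExpandTabs cs 0).map (fun c => if c = '\n' ∨ c = '\r' ∨ c = '\t' then ' ' else c)

-- wordsep split: maximal runs of whitespace / non-whitespace (exact: no hyphens)
def pvSplitRuns (cs : List Char) : List (List Char) :=
  match cs with
  | [] => []
  | c :: rest =>
    ((c :: rest).takeWhile (fun d => (d == ' ') == (c == ' ')))
      :: pvSplitRuns ((c :: rest).dropWhile (fun d => (d == ' ') == (c == ' ')))
termination_by cs.length
decreasing_by
  simp only [List.dropWhile_cons]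
  simp only [beq_self_eq_true, if_pos, List.length_cons]
  exact Nat.lt_succ_of_le (List.length_dropWhile_le _ _)

-- the greedy inner loop of textwrap._wrap_chunks
def pvGreedy (w : Nat) : List (List Char) → Nat → (List (List Char)) × List (List Char)
  | [], _ => ([], [])
  | ch :: rest, cl =>
    if cl + ch.length ≤ w then
      let p := pvGreedy w rest (cl + ch.length)
      (ch :: p.1, p.2)
    else ([], ch :: rest)

-- the outer loop of textwrap._wrap_chunks (fuel only makes the while loop total)
def pvWrapGo : Nat → Nat → List (List Char) → List (List Char) → List (List Char)
  | 0, _, _, lines => lines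
  | _+1, _, [], lines => lines
  | fuel+1, w, c0 :: rest0, lines =>
    let chunks := if lines ≠ [] ∧ pvIsWS c0 then rest0 else c0 :: rest0
    let g := pvGreedy w chunks 0
    let p : List (List Char) × List (List Char) :=
      match g.2 with
      | ch :: rtl =>
        if w < ch.length then
          let spaceLeft := if w < 1 then 1 else w - (g.1.map List.length).sum
          (g.1 ++ [ch.take spaceLeft], ch.drop spaceLeft :: rtl)
        else (g.1, ch :: rtl)
      | [] => (g.1, [])
    let cur2 := match p.1.getLast? with
      | some lc => if pvIsWS lc then p.1.dropLast else p.1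
      | none => p.1
    let lines2 := if cur2 ≠ [] then lines ++ [cur2.flatten] else lines
    pvWrapGo fuel w p.2 lines2

def pvTextwrapWrap (cs : List Char) (w : Nat) : List (List Char) :=
  let munged := pvMunge cs
  let chunks := pvSplitRuns munged
  pvWrapGo (2 * munged.length + chunks.length + 2) w chunks []

-- valueList[j]["vals"].append(ch)  (j is always in range in A; out of range: no-op)
def pvAppendAt (vl : List (Char × List Char)) (j : Nat) (ch : Char) : List (Char × List Char) :=
  match vl, j with
  | [], _ => []
  | p :: rest, 0 => (p.1, p.2 ++ [ch]) :: rest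
  | p :: rest, Nat.succ j' => p :: pvAppendAt rest j' ch

-- findLength(text, cipherText, key): row/column construction, then cipherText.find(column 0)
def pvFindLength (text cipherText key : List Char) : Bool :=
  let t := PySem.Chars.replace text [' '] []
  let k := PySem.Chars.replace key [' '] []
  let rowList := pvTextwrapWrap t k.length
  let valueList : List (Char × List Char) := k.map (fun c => (c, ([] : List Char)))
  let valueList := rowList.foldl
    (fun vl row => (List.range row.length).foldl
      (fun vl j => pvAppendAt vl j (row.getD j ' ')) vl) valueList
  -- tempStr = "".join(i["vals"]); vals are single chars, joined with the empty separator
  let valueList := valueList.map (fun p => (p.1, PySem.Chars.join [] (p.2.map (fun c => [c]))))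
  -- valueList[0] (key is never empty when called: counter = "a"*m, m ≥ 1)
  let result := PySem.Chars.find cipherText ((valueList.headD (' ', [])).2)
  if result = -1 then false else true

-- the while loop of Lengther: counter += "a" each turn, give up past length 7
def pvWhile (t c counter : List Char) : Int :=
  if (counter ++ ['a']).length > 7 then 0
  else if pvFindLength t c (counter ++ ['a']) then ((counter ++ ['a']).length : Int)
  else pvWhile t c (counter ++ ['a'])
termination_by 8 - counter.length
decreasing_by simp only [List.length_append, List.length_cons, List.length_nil, gt_iff_lt, not_lt] at *; omega

def Lengther (text : String) (cipherText : String) : Int :=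
  let t := PySem.Chars.replace text.toList [' '] []
  let c := PySem.Chars.replace cipherText.toList [' '] []
  if t.length ≠ c.length then 0
  else pvWhile t c []

-- ===== PORT B =====

-- for L in range(1, 8): if text[::L] in cipherText: return L   / return 0
def pvScan (t c : List Char) : List Int → Int
  | [] => 0
  | L :: rest =>
    if PySem.Chars.isIn ((PySem.List.slice? t none none L).getD []) c then L
    else pvScan t c rest

def Lengther_alt (text : String) (cipherText : String) : Int :=
  let t := PySem.Chars.replace text.toList [' '] []
  let c := PySem.Chars.replace cipherText.toList [' '] []
  if t.length ≠ c.length then 0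
  else pvScan t c (PySem.List.pyRange 1 8 1)

-- ===== PRECONDITION & SPEC =====

-- Pre_ excludes inputs of equal stripped length whose space-stripped text contains a tab,
-- newline, CR or hyphen: there textwrap.wrap's whitespace handling and hyphen word-splitting
-- deviate from fixed-width chunking, which the port of A (pvWrap) does not model.
def Pre_Lengther (text : String) (cipherText : String) : Prop :=
  (text.toList.filter (· ≠ ' ')).length ≠ (cipherText.toList.filter (· ≠ ' ')).length
  ∨ (text.toList.all (fun ch => ch != '-' && ch != '\t' && ch != '\n' && ch != '\r')) = true
instance (text : String) (cipherText : String) : Decidable (Pre_Lengther text cipherText) := by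
  unfold Pre_Lengther; infer_instance

def pvWitness_Lengther : String × String := ("abcdef", "adbecf")

def Spec_Lengther (text : String) (cipherText : String) (out : Int) : Prop := out = Lengther_alt text cipherText
instance (text : String) (cipherText : String) (out : Int) : Decidable (Spec_Lengther text cipherText out) := by unfold Spec_Lengther; infer_instance

-- ===== CLAIM (what is proved, stated in full; the proofs are below) =====
def Claim_equal_Lengther : Prop := ∀ (text : String) (cipherText : String), Dom_Lengther text cipherText → Pre_Lengther text cipherText → Spec_Lengther text cipherText (Lengther text cipherText)

-- ===== LEMMAS AND PROOFS =====

-- fixed-width chunking: what textwrap.wrap amounts to on Pre_'s clean text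
def pvChunk (cs : List Char) (w : Nat) : List (List Char) :=
  match cs with
  | [] => []
  | c :: rest => ((c :: rest).take w) :: pvChunk (rest.drop (w - 1)) w
termination_by cs.length
decreasing_by simp

-- replace(" ", "") is filtering the spaces out
theorem pv_replace_go_filter (fuel : Nat) (l acc : List Char) (h : l.length ≤ fuel) :
    PySem.Chars.replace.go [' '] [] fuel l acc = acc.reverse ++ l.filter (· ≠ ' ') := by
  induction fuel generalizing l acc with
  | zero =>
    cases l with
    | nil => simp [PySem.Chars.replace.go]
    | cons c t => simp at h
  | succ fuel ih =>
    cases l with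
    | nil => simp [PySem.Chars.replace.go]
    | cons c t =>
      by_cases hc : c = ' '
      · subst hc
        rw [show PySem.Chars.replace.go [' '] [] (fuel+1) (' ' :: t) acc
              = PySem.Chars.replace.go [' '] [] fuel t acc by
            simp [PySem.Chars.replace.go, List.isPrefixOf]]
        rw [ih t acc (by simp at h; omega)]
        simp
      · rw [show PySem.Chars.replace.go [' '] [] (fuel+1) (c :: t) acc
              = PySem.Chars.replace.go [' '] [] fuel t (c :: acc) by
            simp [PySem.Chars.replace.go, List.isPrefixOf, Ne.symm hc]]
        rw [ih t (c :: acc) (by simp at h; omega)]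
        simp [hc]

theorem pv_replace_space (cs : List Char) :
    PySem.Chars.replace cs [' '] [] = cs.filter (· ≠ ' ') := by
  have h := pv_replace_go_filter cs.length cs [] le_rfl
  simpa [PySem.Chars.replace] using h

-- every L-th character, starting at index 0 (text[::L] for L ≥ 1)
def pvStride (cs : List Char) (L : Nat) : List Char :=
  match cs with
  | [] => []
  | c :: rest => c :: pvStride (rest.drop (L - 1)) L
termination_by cs.length
decreasing_by simp

theorem pv_count_drop (r L : Nat) (hL : 1 ≤ L) : (r - (L-1) + L - 1)/L = r/L := by
  rcases Nat.lt_or_ge r (L-1) with h | h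
  · rw [Nat.div_eq_of_lt (by omega), Nat.div_eq_of_lt (by omega)]
  · congr 1; omega

theorem pv_stride_filterMap (L : Nat) (hL : 1 ≤ L) (xs : List Char) :
    (List.range ((xs.length + L - 1)/L)).filterMap (fun k => xs[L*k]?) = pvStride xs L := by
  induction xs using pvStride.induct (L := L) with
  | case1 => rw [pvStride]; simp only [List.length_nil]; rw [Nat.div_eq_of_lt (by omega)]; simp
  | case2 c rest ih =>
    rw [pvStride]
    have hcount : ((c :: rest).length + L - 1)/L = rest.length/L + 1 := by
      simp only [List.length_cons]
      have : rest.length + 1 + L - 1 = rest.length + L := by omega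
      rw [this, Nat.add_div_right _ (by omega)]
    rw [hcount, List.range_succ_eq_map, List.filterMap_cons]
    simp only [Nat.mul_zero, List.getElem?_cons_zero]
    rw [List.filterMap_map]
    congr 1
    have harg : ∀ k : Nat, (c :: rest)[L * (k+1)]? = (rest.drop (L-1))[L*k]? := by
      intro k
      rw [List.getElem?_drop]
      have h1 : L * (k+1) = (L - 1 + L * k) + 1 := by cases L with | zero => omega | succ n => ring_nf; omega
      rw [h1, List.getElem?_cons_succ]
    have hlen : ((rest.drop (L-1)).length + L - 1)/L = rest.length/L := by
      rw [List.length_drop]; exact pv_count_drop rest.length L hL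
    calc List.filterMap ((fun k => (c :: rest)[L*k]?) ∘ Nat.succ) (List.range (rest.length/L))
        = List.filterMap (fun k => (rest.drop (L-1))[L*k]?) (List.range (rest.length/L)) := by
          apply List.filterMap_congr; intro k _; exact harg k
      _ = pvStride (rest.drop (L-1)) L := by rw [← hlen]; exact ih

theorem pv_slice_stride (xs : List Char) (L : Nat) (hL : 1 ≤ L) :
    PySem.List.slice? xs none none (L : Int) = some (pvStride xs L) := by
  have hpos : (0:Int) < (L:Int) := by exact_mod_cast hL
  rw [PySem.List.slice?]
  rw [if_neg (by omega)]
  simp only [PySem.List.sliceIndices, if_neg (by omega : ¬ (L:Int) < 0)]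
  have hcount : (if 0 < (L:Int) then if 0 < (xs.length:Int) then (((xs.length:Int) - 0 + (L:Int) - 1) / (L:Int)).toNat else 0
          else if (xs.length:Int) < 0 then ((0 - (xs.length:Int) + -(L:Int) - 1) / -(L:Int)).toNat else 0)
      = (xs.length + L - 1)/L := by
    rw [if_pos hpos]
    rcases Nat.eq_zero_or_pos xs.length with h0 | h0
    · rw [h0, if_neg (by omega), Nat.div_eq_of_lt (by omega)]
    · rw [if_pos (by exact_mod_cast h0)]
      have he : ((xs.length:Int) - 0 + (L:Int) - 1) = ((xs.length + L - 1 : Nat) : Int) := by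
        omega
      rw [he, ← Int.natCast_div]
      exact Int.toNat_natCast _
  rw [hcount]
  have harg : ∀ k : Nat, xs[((0:Int) + (L:Int) * (k:Int)).toNat]? = xs[L * k]? := by
    intro k
    congr 1
    rw [zero_add, ← Nat.cast_mul, Int.toNat_natCast]
  rw [List.filterMap_congr (by intro k _; exact harg k)]
  rw [pv_stride_filterMap L hL xs]

-- column 0 of the wrapped rows is the stride slice
theorem pv_wrap_col0 (t : List Char) (w : Nat) (hw : 1 ≤ w) :
    (pvChunk t w).map (fun r => r.getD 0 ' ') = pvStride t w := by
  induction t using pvChunk.induct (w := w) with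
  | case1 => simp [pvChunk, pvStride]
  | case2 c rest ih =>
    rw [pvChunk, pvStride]
    simp only [List.map_cons, ih]
    cases w with
    | zero => omega
    | succ n => simp

theorem pv_wrap_ne_nil (t : List Char) (w : Nat) (hw : 1 ≤ w) :
    ∀ r ∈ pvChunk t w, r ≠ [] := by
  induction t using pvChunk.induct (w := w) with
  | case1 => simp [pvChunk]
  | case2 c rest ih =>
    rw [pvChunk]
    intro r hr
    rcases List.mem_cons.mp hr with h | h
    · cases w with
      | zero => omega
      | succ n => subst h; simp
    · exact ih r h

-- entry 0 of the valueList
def pvE0 (vl : List (Char × List Char)) : List Char := (vl.headD (' ', [])).2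

theorem pv_len_appendAt (vl : List (Char × List Char)) (j : Nat) (ch : Char) :
    (pvAppendAt vl j ch).length = vl.length := by
  induction vl generalizing j with
  | nil => simp [pvAppendAt]
  | cons p rest ih =>
    cases j with
    | zero => simp [pvAppendAt]
    | succ j' => simp [pvAppendAt, ih]

theorem pv_e0_appendAt_succ (vl : List (Char × List Char)) (j : Nat) (ch : Char) :
    pvE0 (pvAppendAt vl (j + 1) ch) = pvE0 vl := by
  cases vl <;> simp [pvAppendAt, pvE0]

theorem pv_e0_appendAt_zero (vl : List (Char × List Char)) (ch : Char) (h : vl ≠ []) :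
    pvE0 (pvAppendAt vl 0 ch) = pvE0 vl ++ [ch] := by
  cases vl with
  | nil => simp at h
  | cons p rest => simp [pvAppendAt, pvE0]

theorem pv_e0_fold_succ (f : Nat → Char) (js : List Nat) (vl : List (Char × List Char)) :
    pvE0 (js.foldl (fun acc j => pvAppendAt acc (j + 1) (f (j + 1))) vl) = pvE0 vl := by
  induction js generalizing vl with
  | nil => rfl
  | cons j rest ih => simp [List.foldl_cons, ih, pv_e0_appendAt_succ]

theorem pv_len_fold (f : Nat → Char) (js : List Nat) (vl : List (Char × List Char)) :
    (js.foldl (fun acc j => pvAppendAt acc j (f j)) vl).length = vl.length := by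
  induction js generalizing vl with
  | nil => rfl
  | cons j rest ih => simp [List.foldl_cons, ih, pv_len_appendAt]

theorem pv_e0_row (f : Nat → Char) (n : Nat) (vl : List (Char × List Char)) (hvl : vl ≠ [])
    (hn : n ≠ 0) :
    pvE0 ((List.range n).foldl (fun acc j => pvAppendAt acc j (f j)) vl) = pvE0 vl ++ [f 0] := by
  obtain ⟨m, rfl⟩ : ∃ m, n = m + 1 := ⟨n - 1, by omega⟩
  rw [List.range_succ_eq_map, List.foldl_cons, List.foldl_map]
  rw [pv_e0_fold_succ f _ _, pv_e0_appendAt_zero _ _ hvl]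

theorem pv_e0_fold (rows : List (List Char)) (vl : List (Char × List Char))
    (hvl : vl ≠ []) (hrows : ∀ r ∈ rows, r ≠ []) :
    pvE0 (rows.foldl
      (fun vl row => (List.range row.length).foldl
        (fun vl j => pvAppendAt vl j (row.getD j ' ')) vl) vl)
      = pvE0 vl ++ rows.map (fun r => r.getD 0 ' ') := by
  induction rows generalizing vl with
  | nil => simp
  | cons row rest ih =>
    rw [List.foldl_cons, List.map_cons]
    have hrow : row ≠ [] := hrows row (by simp)
    have h1 := pv_e0_row (fun j => row.getD j ' ') row.length vl hvl (by simpa using hrow)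
    have h2 : ((List.range row.length).foldl (fun acc j => pvAppendAt acc j (row.getD j ' ')) vl) ≠ [] := by
      have := pv_len_fold (fun j => row.getD j ' ') (List.range row.length) vl
      intro hnil; rw [hnil] at this; simp at this; exact hvl (List.eq_nil_of_length_eq_zero this.symm)
    rw [ih _ h2 (fun r hr => hrows r (by simp [hr]))]
    rw [h1]; simp

theorem pv_join_singletons (l : List Char) :
    PySem.Chars.join [] (l.map (fun c => [c])) = l := by
  simp only [PySem.Chars.join, List.intercalate]
  induction l with
  | nil => rfl
  | cons c rest ih =>
    cases rest with
    | nil => rfl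
    | cons d rest2 =>
      simp only [List.map_cons, List.intersperse] at *
      simpa using ih

theorem pv_len_fold_rows (rows : List (List Char)) (vl : List (Char × List Char)) :
    (rows.foldl (fun vl row => (List.range row.length).foldl
      (fun vl j => pvAppendAt vl j (row.getD j ' ')) vl) vl).length = vl.length := by
  induction rows generalizing vl with
  | nil => rfl
  | cons row rest ih =>
    rw [List.foldl_cons, ih, pv_len_fold (fun j => row.getD j ' ')]

theorem pv_headD_map (g : Char × List Char → Char × List Char)
    (vl : List (Char × List Char)) (h : vl ≠ []) :
    (vl.map g).headD (' ', []) = g (vl.headD (' ', [])) := by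
  cases vl with
  | nil => exact absurd rfl h
  | cons p rest => simp

theorem pv_expandTabs_clean (cs : List Char)
    (h : ∀ x ∈ cs, x ≠ '\t' ∧ x ≠ '\n' ∧ x ≠ '\r') : ∀ col, pvExpandTabs cs col = cs := by
  induction cs with
  | nil => intro col; rfl
  | cons c rest ih =>
    intro col
    have hc := h c (by simp)
    rw [pvExpandTabs]
    rw [if_neg hc.1, if_neg (by tauto)]
    rw [ih (fun x hx => h x (by simp [hx])) (col+1)]

theorem pv_munge_clean (cs : List Char)
    (h : ∀ x ∈ cs, x ≠ '\t' ∧ x ≠ '\n' ∧ x ≠ '\r') : pvMunge cs = cs := by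
  rw [pvMunge, pv_expandTabs_clean cs h 0]
  conv_rhs => rw [← List.map_id cs]
  apply List.map_congr_left
  intro x hx
  have := h x hx
  simp [this.1, this.2.1, this.2.2]

theorem pv_isWS_false (t : List Char) (hne : t ≠ []) (h : ∀ x ∈ t, x ≠ ' ') :
    pvIsWS t = false := by
  cases t with
  | nil => exact absurd rfl hne
  | cons c rest =>
    have := h c (by simp)
    simp [pvIsWS]
    exact fun hh => absurd hh this

theorem pv_splitRuns_single (t : List Char) (hne : t ≠ []) (h : ∀ x ∈ t, x ≠ ' ') :
    pvSplitRuns t = [t] := by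
  cases t with
  | nil => exact absurd rfl hne
  | cons c rest =>
    rw [pvSplitRuns]
    have hp : ∀ d ∈ c :: rest, ((d == ' ') == (c == ' ')) = true := by
      intro d hd
      have h1 := h d hd
      have h2 := h c (by simp)
      simp [h1, h2]
    rw [List.takeWhile_eq_self_iff.mpr hp, List.dropWhile_eq_nil_iff.mpr ?_]
    · rw [pvSplitRuns]
    · intro x hx; exact hp x hx

theorem pv_wrapGo_single (w : Nat) (hw : 1 ≤ w) :
    ∀ (fuel : Nat) (t : List Char) (lines : List (List Char)),
      t ≠ [] → (∀ x ∈ t, x ≠ ' ') → t.length + 1 ≤ fuel →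
      pvWrapGo fuel w [t] lines = lines ++ pvChunk t w := by
  intro fuel
  induction fuel with
  | zero => intro t lines hne hsp hf; omega
  | succ f ih =>
    intro t lines hne hsp hf
    rw [pvWrapGo]
    rw [if_neg (by simp [pv_isWS_false t hne hsp])]
    by_cases hle : t.length ≤ w
    · rw [show pvGreedy w [t] 0 = ([t], []) by
        rw [pvGreedy]; simp [hle, pvGreedy]]
      simp only [List.getLast?_singleton, pv_isWS_false t hne hsp,
        Bool.false_eq_true, if_false, ne_eq, List.cons_ne_nil, not_false_eq_true, if_true,
        List.flatten_cons, List.flatten_nil, List.append_nil]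
      have hlen1 : 1 ≤ t.length := List.length_pos_of_ne_nil hne
      have hf1 : 1 ≤ f := by omega
      obtain ⟨f', rfl⟩ : ∃ f', f = f' + 1 := ⟨f - 1, by omega⟩
      rw [pvWrapGo]
      cases t with
      | nil => exact absurd rfl hne
      | cons c rest =>
        rw [pvChunk]
        rw [List.take_of_length_le hle]
        rw [List.drop_of_length_le (by simp only [List.length_cons] at hle; omega)]
        rw [pvChunk]
    · rw [show pvGreedy w [t] 0 = ([], [t]) by
        rw [pvGreedy]; simp [hle]]
      simp only []
      rw [if_pos (by omega)]
      have hsl : (if w < 1 then 1 else w - (List.map List.length ([]:List (List Char))).sum) = w := by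
        rw [if_neg (by omega)]; simp
      rw [hsl]
      simp only [List.nil_append, List.getLast?_singleton]
      have hws : pvIsWS (List.take w t) = false := by
        apply pv_isWS_false
        · intro habs
          have : w < t.length := by omega
          have := congrArg List.length habs
          simp only [List.length_take, List.length_nil] at this
          omega
        · intro x hx
          exact hsp x (List.mem_of_mem_take hx)
      rw [hws]
      simp only [Bool.false_eq_true, if_false, ne_eq, List.cons_ne_nil, not_false_eq_true,
        if_true, List.flatten_cons, List.flatten_nil, List.append_nil]
      have hdne : t.drop w ≠ [] := by
        intro habs
        have := congrArg List.length habs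
        simp only [List.length_drop, List.length_nil] at this
        omega
      rw [ih (t.drop w) _ hdne (fun x hx => hsp x (List.mem_of_mem_drop hx))
        (by simp only [List.length_drop]; omega)]
      cases t with
      | nil => exact absurd rfl hne
      | cons c rest =>
        rw [pvChunk]
        have : List.drop w (c :: rest) = rest.drop (w - 1) := by
          cases w with
          | zero => omega
          | succ n => simp
        rw [this]
        simp
theorem pv_textwrap_clean (t : List Char) (w : Nat) (hw : 1 ≤ w)
    (h : ∀ x ∈ t, x ≠ ' ' ∧ x ≠ '\t' ∧ x ≠ '\n' ∧ x ≠ '\r') :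
    pvTextwrapWrap t w = pvChunk t w := by
  rw [pvTextwrapWrap]
  simp only [pv_munge_clean t (fun x hx => ⟨(h x hx).2.1, (h x hx).2.2.1, (h x hx).2.2.2⟩)]
  cases ht : t with
  | nil => rw [pvSplitRuns, pvChunk]; rfl
  | cons c rest =>
    rw [← ht]
    have hne : t ≠ [] := by rw [ht]; simp
    rw [pv_splitRuns_single t hne (fun x hx => (h x hx).1)]
    have := pv_wrapGo_single w hw (2 * t.length + [t].length + 2) t [] hne
      (fun x hx => (h x hx).1) (by simp; omega)
    simpa using this

theorem pv_findLength_eq (t c key : List Char)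
    (ht : ∀ x ∈ t, x ≠ ' ' ∧ x ≠ '\t' ∧ x ≠ '\n' ∧ x ≠ '\r') (hk : ' ' ∉ key)
    (hne : key ≠ []) :
    pvFindLength t c key = PySem.Chars.isIn (pvStride t key.length) c := by
  have htsp : ' ' ∉ t := fun hmem => (ht ' ' hmem).1 rfl
  have hfix : ∀ l : List Char, ' ' ∉ l → PySem.Chars.replace l [' '] [] = l := by
    intro l hl
    rw [pv_replace_space]
    exact List.filter_eq_self.mpr (fun a ha => by simp; exact fun h => hl (h ▸ ha))
  have hw : 1 ≤ key.length := by
    cases key with | nil => exact absurd rfl hne | cons a b => simp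
  unfold pvFindLength
  rw [hfix t htsp, hfix key hk]
  simp only [pv_textwrap_clean t key.length hw ht]
  have hvl0 : key.map (fun c => (c, ([] : List Char))) ≠ [] := by
    cases key with | nil => exact absurd rfl hne | cons a b => simp
  have he0 := pv_e0_fold (pvChunk t key.length) (key.map (fun c => (c, ([] : List Char))))
    hvl0 (pv_wrap_ne_nil t key.length hw)
  have hE0init : pvE0 (key.map (fun c => (c, ([] : List Char)))) = [] := by
    cases key with | nil => exact absurd rfl hne | cons a b => simp [pvE0]
  rw [hE0init, List.nil_append, pv_wrap_col0 t key.length hw] at he0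
  set vl' := (pvChunk t key.length).foldl
    (fun vl row => (List.range row.length).foldl
      (fun vl j => pvAppendAt vl j (row.getD j ' ')) vl)
    (key.map (fun c => (c, ([] : List Char)))) with hvl'
  have hvlne : vl' ≠ [] := by
    intro hnil
    have hlen : vl'.length = key.length := by
      rw [hvl', pv_len_fold_rows]; simp
    rw [hnil] at hlen
    simp at hlen
    omega
  rw [pv_headD_map _ vl' hvlne]
  have hsnd : (vl'.headD (' ', [])).2 = pvE0 vl' := rfl
  simp only [hsnd, he0, pv_join_singletons]
  cases hi : PySem.Chars.isIn (pvStride t key.length) c with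
  | false =>
    have hni : ¬ pvStride t key.length <:+: c := (PySem.Chars.isIn_eq_false_iff _ _).mp hi
    rw [if_pos ((PySem.Chars.find_eq_neg_one_iff _ _).mpr hni)]
  | true =>
    have hin : pvStride t key.length <:+: c := (PySem.Chars.isIn_iff_infix _ _).mp hi
    rw [if_neg ((PySem.Chars.find_ne_neg_one_iff _ _).mpr hin)]

theorem pv_pyRange_one_empty (a b : Int) (h : b ≤ a) :
    PySem.List.pyRange a b 1 = [] := by
  simp [PySem.List.pyRange, not_lt.mpr h]

theorem pv_while_scan (t c : List Char)
    (ht : ∀ x ∈ t, x ≠ ' ' ∧ x ≠ '\t' ∧ x ≠ '\n' ∧ x ≠ '\r') :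
    ∀ (n : Nat) (counter : List Char), 8 - counter.length ≤ n → ' ' ∉ counter →
      pvWhile t c counter = pvScan t c (PySem.List.pyRange ((counter.length : Int) + 1) 8 1) := by
  intro n
  induction n with
  | zero =>
    intro counter hn hsp
    have h8 : 8 ≤ counter.length := by omega
    rw [pvWhile, if_pos (by simp; omega)]
    rw [pv_pyRange_one_empty _ _ (by omega)]
    rfl
  | succ n ih =>
    intro counter hn hsp
    by_cases h7 : 7 < counter.length + 1
    · rw [pvWhile, if_pos (by simp; omega)]
      rw [pv_pyRange_one_empty _ _ (by omega)]
      rfl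
    · have hcnt_sp : ' ' ∉ counter ++ ['a'] := by
        simp only [List.mem_append, List.mem_singleton]
        rintro (h | h)
        · exact hsp h
        · exact absurd h (by decide)
      have hlen : (counter ++ ['a']).length = counter.length + 1 := by simp
      rw [pvWhile, if_neg (by simp; omega)]
      rw [pv_findLength_eq t c (counter ++ ['a']) ht hcnt_sp (by simp)]
      rw [PySem.List.pyRange_one_cons (by omega)]
      rw [pvScan]
      rw [hlen]
      rw [show ((counter.length : Int) + 1) = (((counter.length + 1 : Nat)) : Int) by push_cast; ring]
      rw [pv_slice_stride t (counter.length + 1) (by omega)]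
      simp only [Option.getD_some]
      split
      · push_cast; ring
      · have hrec := ih (counter ++ ['a']) (by simp; omega) hcnt_sp
        rw [hlen] at hrec
        exact hrec

-- ===== VERDICT (by name: the statement is the Claim_ definition above) =====
theorem Lengther_spec : Claim_equal_Lengther := by
  intro text cipherText _ hpre
  unfold Spec_Lengther Lengther Lengther_alt
  simp only
  split_ifs with hcond
  · rfl
  · have hclean : ∀ x ∈ PySem.Chars.replace text.toList [' '] [],
        x ≠ ' ' ∧ x ≠ '\t' ∧ x ≠ '\n' ∧ x ≠ '\r' := by
      rcases hpre with h | h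
      · rw [pv_replace_space, pv_replace_space] at hcond
        exact absurd (not_not.mp hcond) h
      · intro x hx
        rw [pv_replace_space] at hx
        have hx2 : x ∈ text.toList := List.mem_of_mem_filter hx
        have hxs : x ≠ ' ' := by simpa using List.of_mem_filter hx
        have hb := List.all_eq_true.mp h x hx2
        simp only [Bool.and_eq_true, bne_iff_ne, ne_eq] at hb
        exact ⟨hxs, by tauto, by tauto, by tauto⟩
    rw [pv_while_scan _ _ hclean 8 [] (by simp) (by simp)]
    norm_num
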